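-- pv_equiv track=rewrite | github.com/Parani26/Python_language | mission7_DNA_translation.py | find_transcription_region
-- ===== SOURCE A (Python) =====
-- def find_transcription_region(dna_strand):
--     index = [0, 0]
--     for i in range(len(dna_strand)):
--         if dna_strand[i:i+4] == "TATA":
--             index[0] = i + 4
--             break
--     for i in range(len(dna_strand)):
--         if dna_strand[i:i+4] == "CGCG":
--             index[1] = i + 4
--             break
--     if index == [0, 0]:
--         return None
--     else:
--         return dna_strand[index[0]:index[1]]
-- ===== SOURCE B (Python) =====
-- def find_transcription_region(dna_strand):
--     start = end = 0
--     need_t = need_c = True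
--     i = 0
--     n = len(dna_strand)
--     while i < n and (need_t or need_c):
--         if need_t and dna_strand.startswith("TATA", i):
--             start = i + 4
--             need_t = False
--         if need_c and dna_strand.startswith("CGCG", i):
--             end = i + 4
--             need_c = False
--         i += 1
--     if need_t and need_c:
--         return None
--     return dna_strand[start:end]
-- ===== Notes on version B (the rewrite author's own statement) =====
-- stated objective: alternative
-- what changed: Replaces A's two staged break-on-match for-loops over a sentinel list by ONE while-loop pass that tracks both slice bounds and two found-flags jointly and exits early once both markers are located.
import Mathlib
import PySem

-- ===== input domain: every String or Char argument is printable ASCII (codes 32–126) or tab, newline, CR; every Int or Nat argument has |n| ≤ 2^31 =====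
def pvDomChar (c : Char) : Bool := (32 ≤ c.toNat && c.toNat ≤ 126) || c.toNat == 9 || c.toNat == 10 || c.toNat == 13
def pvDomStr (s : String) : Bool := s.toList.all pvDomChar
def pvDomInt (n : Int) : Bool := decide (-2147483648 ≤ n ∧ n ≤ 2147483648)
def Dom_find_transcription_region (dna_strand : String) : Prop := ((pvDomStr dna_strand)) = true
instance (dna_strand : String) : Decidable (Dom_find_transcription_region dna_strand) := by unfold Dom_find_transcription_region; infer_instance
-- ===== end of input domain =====

-- B replaces A's two staged break-on-match for-loops by one early-exiting while loop whose
-- joint state carries both slice bounds and two found-flags; objective: alternative (no speed claim).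

-- ===== PORT A =====
-- the 'for i in range(len(dna_strand)): if dna_strand[i:i+4] == pat: <i+4>; break' loop;
-- returns the leftover sentinel 0 when the loop finishes without a break
def pvALoop (s : List Char) (pat : List Char) : List Int → Int
  | [] => 0
  | i :: rest =>
      if PySem.List.slice s (some i) (some (i + 4)) = pat then i + 4
      else pvALoop s pat rest

def find_transcription_region (dna_strand : String) : Option String :=
  let s := dna_strand.toList
  let idx0 := pvALoop s "TATA".toList (PySem.List.pyRange 0 (PySem.Str.len dna_strand) 1)
  let idx1 := pvALoop s "CGCG".toList (PySem.List.pyRange 0 (PySem.Str.len dna_strand) 1)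
  if idx0 = 0 ∧ idx1 = 0 then none
  else some (String.ofList (PySem.List.slice s (some idx0) (some idx1)))

-- ===== PORT B =====
-- the 'while i < n and (need_t or need_c): …' loop of Source B, step for step;
-- Python's dna_strand.startswith(pat, i) is ported by hand as List.isPrefixOf pat (s.drop i),
-- which is exact for the indices 0 ≤ i < len(s) the loop visits.
def pvBLoop (s : List Char) (st en : Int) (needT needC : Bool) (i : Nat) :
    Int × Int × Bool × Bool :=
  if h : i < s.length ∧ (needT || needC) = true then
    let pT := if needT && List.isPrefixOf ['T','A','T','A'] (s.drop i)
              then ((i : Int) + 4, false) else (st, needT)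
    let pC := if needC && List.isPrefixOf ['C','G','C','G'] (s.drop i)
              then ((i : Int) + 4, false) else (en, needC)
    pvBLoop s pT.1 pC.1 pT.2 pC.2 (i + 1)
  else (st, en, needT, needC)
termination_by s.length - i
decreasing_by omega

def find_transcription_region_alt (dna_strand : String) : Option String :=
  let s := dna_strand.toList
  let r := pvBLoop s 0 0 true true 0
  if r.2.2.1 && r.2.2.2 then none
  else some (String.ofList (PySem.List.slice s (some r.1) (some r.2.1)))

-- ===== PRECONDITION & SPEC =====
def Spec_find_transcription_region (dna_strand : String) (out : Option String) : Prop := out = find_transcription_region_alt dna_strand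
instance (dna_strand : String) (out : Option String) : Decidable (Spec_find_transcription_region dna_strand out) := by unfold Spec_find_transcription_region; infer_instance

-- ===== CLAIM (what is proved, stated in full; the proofs are below) =====
def Claim_equal_find_transcription_region : Prop := ∀ (dna_strand : String), Dom_find_transcription_region dna_strand → Spec_find_transcription_region dna_strand (find_transcription_region dna_strand)

-- ===== LEMMAS AND PROOFS =====

-- first-occurrence facts about PySem.Chars.find, shared by both loop characterisations
theorem pvFind_none (s pat : List Char) (hp : 1 ≤ pat.length)
    (hmiss : ∀ j, j < s.length → ¬ pat <+: s.drop j) :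
    PySem.Chars.find s pat = -1 := by
  rw [PySem.Chars.find_eq_neg_one_iff]
  intro hinf
  have hIn : PySem.Chars.isIn pat s = true := (PySem.Chars.isIn_iff_infix pat s).mpr hinf
  obtain ⟨j, hj⟩ := (PySem.Chars.exists_prefix_drop_iff_isIn pat s).mpr hIn
  by_cases hjlt : j < s.length
  · exact hmiss j hjlt hj
  · have hlen : pat.length ≤ (s.drop j).length := hj.length_le
    simp [List.length_drop] at hlen
    omega

theorem pvFind_at (s pat : List Char) (k : Nat) (hpre : pat <+: s.drop k)
    (hmiss : ∀ j, j < k → ¬ pat <+: s.drop j) :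
    PySem.Chars.find s pat = (k : Int) := by
  have hIn : PySem.Chars.isIn pat s = true :=
    (PySem.Chars.exists_prefix_drop_iff_isIn pat s).mp ⟨k, hpre⟩
  have hnn : 0 ≤ PySem.Chars.find s pat := by
    rw [PySem.Chars.find_nonneg_iff]
    exact (PySem.Chars.isIn_iff_infix pat s).mp hIn
  obtain ⟨hfpre, hfmin⟩ := PySem.Chars.find_spec (s := s) (sub := pat) hnn
  have hfk : (PySem.Chars.find s pat).toNat = k := by
    by_contra hne
    rcases Nat.lt_or_ge (PySem.Chars.find s pat).toNat k with hlt | hge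
    · exact hmiss _ hlt hfpre
    · exact hfmin k (by omega) hpre
  omega

-- the breaking scan over range(k, len s) computes the first occurrence (offset +4, 0 when absent)
theorem pvALoop_range (s pat : List Char) (hp : pat.length = 4) :
    ∀ (k : Nat), k ≤ s.length →
      (∀ i : Nat, i < k → ¬ pat <+: s.drop i) →
      pvALoop s pat (PySem.List.pyRange (k : Int) (s.length : Int) 1) =
        (if PySem.Chars.find s pat = -1 then 0 else PySem.Chars.find s pat + 4) := by
  intro k hk hmiss
  induction hn : s.length - k generalizing k with
  | zero =>
      have hkn : k = s.length := by omega
      rw [PySem.List.pyRange_one_eq_nil (by omega)]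
      have hfind : PySem.Chars.find s pat = -1 :=
        pvFind_none s pat (by omega) (by intro j hj; exact hmiss j (by omega))
      simp [pvALoop, hfind]
  | succ m ih =>
      have hklt : k < s.length := by omega
      rw [PySem.List.pyRange_one_cons (by exact_mod_cast hklt)]
      by_cases hpre : pat <+: s.drop k
      · have hslice : PySem.List.slice s (some (k : Int)) (some ((k : Int) + 4)) = pat := by
          have h4 : ((k : Int) + 4) = ((k : Int) + ((4 : Nat) : Int)) := by norm_num
          rw [h4, PySem.List.slice_natCast_add]
          have := (List.prefix_iff_eq_take.mp hpre)
          rw [← hp]; exact this.symm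
        have hfval : PySem.Chars.find s pat = (k : Int) := pvFind_at s pat k hpre hmiss
        simp [pvALoop, hslice, hfval]
      · have hslice : PySem.List.slice s (some (k : Int)) (some ((k : Int) + 4)) ≠ pat := by
          have h4 : ((k : Int) + 4) = ((k : Int) + ((4 : Nat) : Int)) := by norm_num
          rw [h4, PySem.List.slice_natCast_add]
          intro heq
          exact hpre (List.prefix_iff_eq_take.mpr (by rw [← hp] at heq; exact heq.symm))
        have hmiss' : ∀ i : Nat, i < k + 1 → ¬ pat <+: s.drop i := by
          intro i hi
          rcases Nat.lt_or_ge i k with h | h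
          · exact hmiss i h
          · have : i = k := by omega
            subst this; exact hpre
        have := ih (k + 1) (by omega) hmiss' (by omega)
        simpa [pvALoop, hslice, Int.natCast_add] using this

-- once both flags are cleared the while loop exits immediately
theorem pvBLoop_done (s : List Char) (st en : Int) (i : Nat) :
    pvBLoop s st en false false i = (st, en, false, false) := by
  rw [pvBLoop]; simp

-- phase with only CGCG still wanted
theorem pvBLoop_onlyC (s : List Char) (st en : Int) :
    ∀ (k : Nat), k ≤ s.length →
      (∀ j, j < k → ¬ ['C','G','C','G'] <+: s.drop j) →
      pvBLoop s st en false true k =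
        if PySem.Chars.find s ['C','G','C','G'] = -1 then (st, en, false, true)
        else (st, PySem.Chars.find s ['C','G','C','G'] + 4, false, false) := by
  intro k hk hmiss
  induction hn : s.length - k generalizing k en with
  | zero =>
      have hfind := pvFind_none s ['C','G','C','G'] (by decide)
        (by intro j hj; exact hmiss j (by omega))
      rw [pvBLoop]
      simp [hfind]; omega
  | succ m ih =>
      have hklt : k < s.length := by omega
      rw [pvBLoop]
      by_cases hpre : ['C','G','C','G'] <+: s.drop k
      · have hfval := pvFind_at s _ k hpre hmiss
        have hbeq : List.isPrefixOf ['C','G','C','G'] (s.drop k) = true := by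
          rw [List.isPrefixOf_iff_prefix]; exact hpre
        simp [hklt, hbeq, pvBLoop_done, hfval]
      · have hbeq : List.isPrefixOf ['C','G','C','G'] (s.drop k) = false := by
          rw [Bool.eq_false_iff]
          intro h; exact hpre (List.isPrefixOf_iff_prefix.mp h)
        have hmiss' : ∀ j, j < k + 1 → ¬ ['C','G','C','G'] <+: s.drop j := by
          intro j hj
          rcases Nat.lt_or_ge j k with h | h
          · exact hmiss j h
          · have : j = k := by omega
            subst this; exact hpre
        have := ih en (k + 1) (by omega) hmiss' (by omega)
        simpa [hklt, hbeq] using this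

-- phase with only TATA still wanted
theorem pvBLoop_onlyT (s : List Char) (st en : Int) :
    ∀ (k : Nat), k ≤ s.length →
      (∀ j, j < k → ¬ ['T','A','T','A'] <+: s.drop j) →
      pvBLoop s st en true false k =
        if PySem.Chars.find s ['T','A','T','A'] = -1 then (st, en, true, false)
        else (PySem.Chars.find s ['T','A','T','A'] + 4, en, false, false) := by
  intro k hk hmiss
  induction hn : s.length - k generalizing k st with
  | zero =>
      have hfind := pvFind_none s ['T','A','T','A'] (by decide)
        (by intro j hj; exact hmiss j (by omega))
      rw [pvBLoop]
      simp [hfind]; omega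
  | succ m ih =>
      have hklt : k < s.length := by omega
      rw [pvBLoop]
      by_cases hpre : ['T','A','T','A'] <+: s.drop k
      · have hfval := pvFind_at s _ k hpre hmiss
        have hbeq : List.isPrefixOf ['T','A','T','A'] (s.drop k) = true := by
          rw [List.isPrefixOf_iff_prefix]; exact hpre
        simp [hklt, hbeq, pvBLoop_done, hfval]
      · have hbeq : List.isPrefixOf ['T','A','T','A'] (s.drop k) = false := by
          rw [Bool.eq_false_iff]
          intro h; exact hpre (List.isPrefixOf_iff_prefix.mp h)
        have hmiss' : ∀ j, j < k + 1 → ¬ ['T','A','T','A'] <+: s.drop j := by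
          intro j hj
          rcases Nat.lt_or_ge j k with h | h
          · exact hmiss j h
          · have : j = k := by omega
            subst this; exact hpre
        have := ih st (k + 1) (by omega) hmiss' (by omega)
        simpa [hklt, hbeq] using this

-- TATA and CGCG cannot both start at the same index
theorem pvNotBoth (s : List Char) (k : Nat)
    (hT : ['T','A','T','A'] <+: s.drop k) (hC : ['C','G','C','G'] <+: s.drop k) : False := by
  obtain ⟨u, hu⟩ := hT
  obtain ⟨v, hv⟩ := hC
  rw [← hv] at hu
  simp at hu

-- the joint phase: both flags set computes both first occurrences
theorem pvBLoop_both (s : List Char) (st en : Int) :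
    ∀ (k : Nat), k ≤ s.length →
      (∀ j, j < k → ¬ ['T','A','T','A'] <+: s.drop j) →
      (∀ j, j < k → ¬ ['C','G','C','G'] <+: s.drop j) →
      pvBLoop s st en true true k =
        ((if PySem.Chars.find s ['T','A','T','A'] = -1 then st
          else PySem.Chars.find s ['T','A','T','A'] + 4),
         (if PySem.Chars.find s ['C','G','C','G'] = -1 then en
          else PySem.Chars.find s ['C','G','C','G'] + 4),
         decide (PySem.Chars.find s ['T','A','T','A'] = -1),
         decide (PySem.Chars.find s ['C','G','C','G'] = -1)) := by
  intro k hk hmT hmC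
  induction hn : s.length - k generalizing k with
  | zero =>
      have hfT := pvFind_none s ['T','A','T','A'] (by decide)
        (by intro j hj; exact hmT j (by omega))
      have hfC := pvFind_none s ['C','G','C','G'] (by decide)
        (by intro j hj; exact hmC j (by omega))
      rw [pvBLoop]
      simp [hfT, hfC]; omega
  | succ m ih =>
      have hklt : k < s.length := by omega
      rw [pvBLoop]
      by_cases hpT : ['T','A','T','A'] <+: s.drop k
      · by_cases hpC : ['C','G','C','G'] <+: s.drop k
        · exact (pvNotBoth s k hpT hpC).elim
        · -- TATA found at k, keep scanning for CGCG only
          have hfT := pvFind_at s _ k hpT hmT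
          have hbT : List.isPrefixOf ['T','A','T','A'] (s.drop k) = true := by
            rw [List.isPrefixOf_iff_prefix]; exact hpT
          have hbC : List.isPrefixOf ['C','G','C','G'] (s.drop k) = false := by
            rw [Bool.eq_false_iff]; intro h; exact hpC (List.isPrefixOf_iff_prefix.mp h)
          have hmC' : ∀ j, j < k + 1 → ¬ ['C','G','C','G'] <+: s.drop j := by
            intro j hj
            rcases Nat.lt_or_ge j k with h | h
            · exact hmC j h
            · have : j = k := by omega
              subst this; exact hpC
          have := pvBLoop_onlyC s ((k : Int) + 4) en (k + 1) (by omega) hmC'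
          simp only [hklt, hbT, hbC] at *
          simp [hfT, this]
          split_ifs with h <;> simp [h]
      · by_cases hpC : ['C','G','C','G'] <+: s.drop k
        · -- CGCG found at k, keep scanning for TATA only
          have hfC := pvFind_at s _ k hpC hmC
          have hbC : List.isPrefixOf ['C','G','C','G'] (s.drop k) = true := by
            rw [List.isPrefixOf_iff_prefix]; exact hpC
          have hbT : List.isPrefixOf ['T','A','T','A'] (s.drop k) = false := by
            rw [Bool.eq_false_iff]; intro h; exact hpT (List.isPrefixOf_iff_prefix.mp h)
          have hmT' : ∀ j, j < k + 1 → ¬ ['T','A','T','A'] <+: s.drop j := by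
            intro j hj
            rcases Nat.lt_or_ge j k with h | h
            · exact hmT j h
            · have : j = k := by omega
              subst this; exact hpT
          have := pvBLoop_onlyT s st ((k : Int) + 4) (k + 1) (by omega) hmT'
          simp only [hklt, hbT, hbC] at *
          simp [hfC, this]
          split_ifs with h <;> simp [h]
        · -- neither marker at k
          have hbT : List.isPrefixOf ['T','A','T','A'] (s.drop k) = false := by
            rw [Bool.eq_false_iff]; intro h; exact hpT (List.isPrefixOf_iff_prefix.mp h)
          have hbC : List.isPrefixOf ['C','G','C','G'] (s.drop k) = false := by
            rw [Bool.eq_false_iff]; intro h; exact hpC (List.isPrefixOf_iff_prefix.mp h)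
          have hmT' : ∀ j, j < k + 1 → ¬ ['T','A','T','A'] <+: s.drop j := by
            intro j hj
            rcases Nat.lt_or_ge j k with h | h
            · exact hmT j h
            · have : j = k := by omega
              subst this; exact hpT
          have hmC' : ∀ j, j < k + 1 → ¬ ['C','G','C','G'] <+: s.drop j := by
            intro j hj
            rcases Nat.lt_or_ge j k with h | h
            · exact hmC j h
            · have : j = k := by omega
              subst this; exact hpC
          have := ih (k + 1) (by omega) hmT' hmC' (by omega)
          simpa [hklt, hbT, hbC] using this

-- ===== VERDICT (by name: the statement is the Claim_ definition above) =====
theorem find_transcription_region_spec : Claim_equal_find_transcription_region := by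
  unfold Claim_equal_find_transcription_region
  intro dna _
  unfold Spec_find_transcription_region
  unfold find_transcription_region find_transcription_region_alt
  have hlen : PySem.Str.len dna = (dna.toList.length : Int) := by simp
  have hT := pvALoop_range dna.toList ['T','A','T','A'] (by decide) 0 (Nat.zero_le _)
      (by intro i hi; omega)
  have hC := pvALoop_range dna.toList ['C','G','C','G'] (by decide) 0 (Nat.zero_le _)
      (by intro i hi; omega)
  have hB := pvBLoop_both dna.toList 0 0 0 (Nat.zero_le _)
      (by intro j hj; omega) (by intro j hj; omega)
  simp only [hlen, Int.natCast_zero] at hT hC ⊢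
  have hTl : "TATA".toList = ['T','A','T','A'] := by decide
  have hCl : "CGCG".toList = ['C','G','C','G'] := by decide
  rw [hTl, hCl, hT, hC, hB]
  have hTge : -1 ≤ PySem.Chars.find dna.toList ['T','A','T','A'] := PySem.Chars.neg_one_le_find _ _
  have hCge : -1 ≤ PySem.Chars.find dna.toList ['C','G','C','G'] := PySem.Chars.neg_one_le_find _ _
  by_cases ht : PySem.Chars.find dna.toList ['T','A','T','A'] = -1 <;>
  by_cases hc : PySem.Chars.find dna.toList ['C','G','C','G'] = -1 <;>
    simp [ht, hc] <;> omega
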